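/- GENERATED by tools/from_farm_form.py from prooffarm-gif/accepted/DGifBufferedInput.E/Proof.lean (a worked proof of the farm's unit `DGifBufferedInput.E`,
   accepted by the verdict) — do not edit. -/
import Gif.Spec.Units.DGifBufferedInput_E
import Gif.Spec.AllSegs

open X86 X86.User Asan ProgX.Base ProgX.Base.Spec Gif.Spec

set_option maxRecDepth 4000
set_option maxHeartbeats 4000000

/-!
  `DGifBufferedInput.E` (0x10659d … the `ret` at 0x1065a7, 7 instructions; dgif_lib.c:1148): THE EPILOGUE OF AN UNPROTECTED FUNCTION:
  `mov eax, ebp`, five pops, `ret`. No store: the memory of the returned state is the memory of the entry assertion `Done`.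
    1. the prelude: the segment's entry assertion as walker facts (`c_rsp`, the six stack slots);
    2. the walk to the `ret` (no side goal);
    3. `Returned`, field by field: `saved` from the pops and `Frame.r15`, `same` is `Frame.same`, the post from `Done`
       (`HeapInv` restated at the caller's stack pointer by `HeapPre.raise_back`).
-/

/-- The epilogue of `DGifBufferedInput` takes `Done` at 0x10659d to `Returned`. -/
theorem Gif.Spec.Proved.DGifBufferedInput_E_ok : Gif.Spec.DGifBufferedInput_E.Statement := by
  intro Lay hLay μ hμ u₀ hcode H rest frames F R e ret v hat
  -- 1. THE PRELUDE: the entry assertion `Done` = `Frame` + the result in `rbp` + the measure clause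
  obtain ⟨hframe, hres, hok1⟩ := hat
  have he := hframe.entry
  v_entry he
  obtain ⟨henv, hrdi, hrsi, hout⟩ := hframe.pre
  -- what the walker reads of a segment's entry state: rip, rsp (as `c_rsp`), the registers kept, the text, DF / MXCSR
  have w_rip := hframe.rip
  have c_rsp : v.reg .rsp = e.reg .rsp - 40 := hframe.rsp
  have w_kept : RegsKept [.rsp] v v := RegsKept.refl _ _
  have w_eq : Mem.EqOn ProgX.Base.L.textLo ProgX.Base.L.textHi u₀.mem v.mem := ProgX.Base.conv_code_eqOn hframe.code
  have hdf := (show abiInv _ from hframe.abi).1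
  have hmx := (show abiInv _ from hframe.abi).2
  have hsse := ProgX.Base.sseOK_of_abiInv hframe.abi
  -- the slots the five pops and the `ret` read
  have k_r14 : v.mem.readLE (e.reg .rsp - 8) 8 = (e.reg .r14).toNat := hframe.slot_r14
  have k_r13 : v.mem.readLE (e.reg .rsp - 16) 8 = (e.reg .r13).toNat := hframe.slot_r13
  have k_r12 : v.mem.readLE (e.reg .rsp - 24) 8 = (e.reg .r12).toNat := hframe.slot_r12
  have k_rbp : v.mem.readLE (e.reg .rsp - 32) 8 = (e.reg .rbp).toNat := hframe.slot_rbp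
  have k_rbx : v.mem.readLE (e.reg .rsp - 40) 8 = (e.reg .rbx).toNat := hframe.slot_rbx
  have k_ra : UInt64.ofNat (v.mem.readLE (e.reg .rsp) 8) = ret := hframe.slot_ra
  -- 2. THE WALK, 10659DH (`mov eax, ebp`, l.1148) to the `ret` at 1065A7H
  u_walk hcode [hμ.vendor] span [ProgX.Base.L.textLo, ProgX.Base.L.textHi] side (v_side)
  -- the result register: `mov eax, ebp` zero-extends the low half of `rbp`, which holds 0 or 1
  have e_rax : (s_1065a7.reg .rax).toNat = (v.reg .rbp).toNat := by
    rw [w_rax, ProgX.toNat_ofBV32, ProgX.toNat_part32]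
    omega
  -- the clean stack ends at the caller's stack pointer again (no protected frame of its own: the same frames)
  have hinv2 : HeapInv H rest frames ((e.reg .rsp).toNat + 8) v.mem :=
    henv.heap.raise_back hframe.inv (by omega)
  -- 3. `Returned`, field by field
  refine ReachVia.done ?_
  refine X86.User.Returned.mk w_rip w_rsp ?saved ?same (ProgX.Base.conv_code_in w_eq) ?abi ?post
  case saved =>
    -- the popped registers are the walker's facts; `r15` was never touched: `Frame.r15`
    intro r hr
    cases r <;> first
      | exact absurd hr (by decide)
      | (with_reducible assumption)
      | exact (w_kept _ rfl).trans hframe.r15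
  case same =>
    -- no store: the footprint carried by the assertion
    simp only [X86.User.Spec.footprint, vspec]
    rw [w_mem]
    exact hframe.same
  case abi =>
    -- DF and MXCSR are those of the entry assertion
    refine ProgX.Base.abiInv_of ?_ ?_
    · rw [w_flags]
      exact hdf
    · rw [w_mxcsr]
      exact hmx
  case post =>
    -- `Back` (the environment, the reader did not go back), the result is 0 or 1, the measure clause of `Done`
    show Back H rest frames F R e s_1065a7 ∧ IsBool s_1065a7 ∧
      ((s_1065a7.reg .rax).toNat = 1 →
        rem R s_1065a7.mem + rd s_1065a7.mem (F.pv + 88) 1 + 1 ≤ rem R e.mem + rd e.mem (F.pv + 88) 1)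
    rw [w_mem]
    refine ⟨⟨?_, ?_, ?_⟩, ?_, ?_⟩
    · rw [w_mem]
      exact hinv2
    · rw [w_mem]
      exact hframe.ok
    · rw [w_mem]
      exact hframe.rem
    · show (s_1065a7.reg .rax).toNat = 1 ∨ (s_1065a7.reg .rax).toNat = 0
      rw [e_rax]
      exact hres
    · rw [e_rax]
      exact hok1
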